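-- pv_equiv track=rewrite | github.com/pypi-data/pypi-mirror-403 | packages/wafer-core/wafer_core-0.1.34.tar.gz/wafer_core-0.1.34/wafer_core/lib/kernel_scope/amdgcn/parser.py | _extract_operands
-- ===== SOURCE A (Python) =====
-- def _extract_operands(line: str, mnemonic: str) -> list[str]:
--     """Extract operands from instruction line."""
--     # Remove comment
--     if ";" in line:
--         line = line.split(";")[0]
--     if "//" in line:
--         line = line.split("//")[0]
--
--     line = line.strip()
--
--     # Find mnemonic position and extract rest
--     mnemonic_lower = mnemonic.lower()
--     line_lower = line.lower()
--
--     idx = line_lower.find(mnemonic_lower)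
--     if idx == -1:
--         return []
--
--     operand_str = line[idx + len(mnemonic):].strip()
--     if not operand_str:
--         return []
--
--     # Split by comma, handling potential nested brackets
--     operands = []
--     current = ""
--     bracket_depth = 0
--
--     for char in operand_str:
--         if char in "([{":
--             bracket_depth += 1
--             current += char
--         elif char in ")]}":
--             bracket_depth -= 1
--             current += char
--         elif char == "," and bracket_depth == 0:
--             if current.strip():
--                 operands.append(current.strip())
--             current = ""
--         else:
--             current += char
--
--     if current.strip():
--         operands.append(current.strip())
--
--     return operands
-- ===== SOURCE B (Python) =====
-- def _strip_comments(line):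
--     if ";" in line:
--         line = line.split(";")[0]
--     if "//" in line:
--         line = line.split("//")[0]
--     return line.strip()
--
--
-- def _extract_operands(line: str, mnemonic: str) -> list[str]:
--     line = _strip_comments(line)
--
--     idx = line.lower().find(mnemonic.lower())
--     if idx == -1:
--         return []
--
--     rest = line[idx + len(mnemonic):].strip()
--
--     # Phase 1: one scan recording the index of every comma at bracket depth 0.
--     cuts = []
--     depth = 0
--     for i, ch in enumerate(rest):
--         if ch in "([{":
--             depth += 1
--         elif ch in ")]}":
--             depth -= 1
--         elif ch == "," and depth == 0:
--             cuts.append(i)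
--
--     # Phase 2: slice between consecutive boundaries, strip, drop empties.
--     operands = []
--     start = 0
--     for cut in cuts + [len(rest)]:
--         seg = rest[start:cut].strip()
--         if seg:
--             operands.append(seg)
--         start = cut + 1
--     return operands
-- ===== Notes on version B (the rewrite author's own statement) =====
-- stated objective: alternative
-- what changed: The comma split is re-decomposed from A's accumulate-into-current-buffer-and-flush loop into two phases: one scan that only records the indices of depth-0 commas, then slicing the operand string between consecutive boundaries (strip each slice, drop empties); comment removal, strip and mnemonic-find phases are unchanged.
import Mathlib
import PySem

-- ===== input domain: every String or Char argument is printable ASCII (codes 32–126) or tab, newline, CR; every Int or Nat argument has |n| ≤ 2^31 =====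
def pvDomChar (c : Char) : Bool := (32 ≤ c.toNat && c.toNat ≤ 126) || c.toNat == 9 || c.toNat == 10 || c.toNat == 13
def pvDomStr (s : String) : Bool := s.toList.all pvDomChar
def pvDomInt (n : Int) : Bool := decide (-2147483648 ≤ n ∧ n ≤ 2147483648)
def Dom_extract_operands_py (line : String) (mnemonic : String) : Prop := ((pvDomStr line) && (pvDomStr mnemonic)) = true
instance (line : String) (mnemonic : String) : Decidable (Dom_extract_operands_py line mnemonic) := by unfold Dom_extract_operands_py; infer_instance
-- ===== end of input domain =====

-- B re-implements the top-level comma split as a two-phase boundary scan (record depth-0 comma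
-- indices, then slice between them) instead of A's accumulate-and-flush buffer loop; objective:
-- alternative decomposition, same cost.

-- ===== PORT A =====
-- final flush of A's loop: append current.strip() if nonempty
def finA (st : List String × List Char × Int) : List String :=
  if PySem.Chars.strip st.2.1 ≠ [] then st.1 ++ [String.ofList (PySem.Chars.strip st.2.1)] else st.1

-- loop body of A's 'for char in operand_str' (state: operands, current, bracket_depth)
def stepA (st : List String × List Char × Int) (c : Char) : List String × List Char × Int :=
  if c = '(' ∨ c = '[' ∨ c = '{' then (st.1, st.2.1 ++ [c], st.2.2 + 1)
  else if c = ')' ∨ c = ']' ∨ c = '}' then (st.1, st.2.1 ++ [c], st.2.2 - 1)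
  else if c = ',' ∧ st.2.2 = 0 then
    (if PySem.Chars.strip st.2.1 ≠ [] then st.1 ++ [String.ofList (PySem.Chars.strip st.2.1)] else st.1,
     [], st.2.2)
  else (st.1, st.2.1 ++ [c], st.2.2)

def extract_operands_py (line : String) (mnemonic : String) : List String :=
  let line1 := if PySem.Str.isIn ";" line then PySem.List.pyGetD ((PySem.Str.split? line ";").getD []) 0 "" else line
  let line2 := if PySem.Str.isIn "//" line1 then PySem.List.pyGetD ((PySem.Str.split? line1 "//").getD []) 0 "" else line1
  let line3 := PySem.Str.strip line2
  let idx := PySem.Str.find (PySem.Str.lower line3) (PySem.Str.lower mnemonic)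
  if idx = -1 then []
  else
    let operandStr := PySem.Str.strip (PySem.Str.slice line3 (some (idx + PySem.Str.len mnemonic)) none)
    if operandStr = "" then []
    else
      finA (operandStr.toList.foldl stepA ([], [], 0))

-- ===== PORT B =====
def stripCommentsB (line : String) : String :=
  let line1 := if PySem.Str.isIn ";" line then PySem.List.pyGetD ((PySem.Str.split? line ";").getD []) 0 "" else line
  let line2 := if PySem.Str.isIn "//" line1 then PySem.List.pyGetD ((PySem.Str.split? line1 "//").getD []) 0 "" else line1
  PySem.Str.strip line2

-- phase 1: record indices of depth-0 commas (state: cuts, depth)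
def stepCutsB (st : List Int × Int) (p : Int × Char) : List Int × Int :=
  if p.2 = '(' ∨ p.2 = '[' ∨ p.2 = '{' then (st.1, st.2 + 1)
  else if p.2 = ')' ∨ p.2 = ']' ∨ p.2 = '}' then (st.1, st.2 - 1)
  else if p.2 = ',' ∧ st.2 = 0 then (st.1 ++ [p.1], st.2)
  else st

-- phase 2: slice between consecutive boundaries, strip, drop empties (state: operands, start)
def stepSliceB (whole : List Char) (st : List String × Int) (cut : Int) : List String × Int :=
  let seg := PySem.Chars.strip (PySem.List.slice whole (some st.2) (some cut))
  (if seg ≠ [] then st.1 ++ [String.ofList seg] else st.1, cut + 1)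

def extract_operands_py_alt (line : String) (mnemonic : String) : List String :=
  let line3 := stripCommentsB line
  let idx := PySem.Str.find (PySem.Str.lower line3) (PySem.Str.lower mnemonic)
  if idx = -1 then []
  else
    let rest := (PySem.Str.strip (PySem.Str.slice line3 (some (idx + PySem.Str.len mnemonic)) none)).toList
    let cuts := ((PySem.List.enumerate rest).foldl stepCutsB ([], 0)).1
    ((cuts ++ [(rest.length : Int)]).foldl (stepSliceB rest) ([], 0)).1

-- ===== PRECONDITION & SPEC =====
def Spec_extract_operands_py (line : String) (mnemonic : String) (out : List String) : Prop := out = extract_operands_py_alt line mnemonic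
instance (line : String) (mnemonic : String) (out : List String) : Decidable (Spec_extract_operands_py line mnemonic out) := by unfold Spec_extract_operands_py; infer_instance

-- ===== CLAIM (what is proved, stated in full; the proofs are below) =====
def Claim_equal_extract_operands_py : Prop := ∀ (line : String) (mnemonic : String), Dom_extract_operands_py line mnemonic → Spec_extract_operands_py line mnemonic (extract_operands_py line mnemonic)

-- ===== LEMMAS AND PROOFS =====

-- reference splitter: raw segments between depth-0 commas, built structurally
def consHd (m : List Char) : List (List Char) → List (List Char)
  | [] => [m]
  | p :: ps => (m ++ p) :: ps

def splitTopB : List Char → Int → List (List Char)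
  | [], _ => [[]]
  | c :: cs, d =>
    if c = '(' ∨ c = '[' ∨ c = '{' then consHd [c] (splitTopB cs (d + 1))
    else if c = ')' ∨ c = ']' ∨ c = '}' then consHd [c] (splitTopB cs (d - 1))
    else if c = ',' ∧ d = 0 then [] :: splitTopB cs d
    else consHd [c] (splitTopB cs d)

def filtB (l : List (List Char)) : List String :=
  l.filterMap (fun p => if PySem.Chars.strip p = [] then none else some (String.ofList (PySem.Chars.strip p)))

-- reference boundary list: indices (cast from Nat offset q) of depth-0 commas
def cutsN : Nat → Int → List Char → List Int
  | _, _, [] => []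
  | q, d, c :: cs =>
    if c = '(' ∨ c = '[' ∨ c = '{' then cutsN (q + 1) (d + 1) cs
    else if c = ')' ∨ c = ']' ∨ c = '}' then cutsN (q + 1) (d - 1) cs
    else if c = ',' ∧ d = 0 then (q : Int) :: cutsN (q + 1) d cs
    else cutsN (q + 1) d cs

theorem consHd_ne_nil (m : List Char) (l : List (List Char)) : consHd m l ≠ [] := by
  cases l <;> simp [consHd]

theorem splitTopB_ne_nil (cs : List Char) (d : Int) : splitTopB cs d ≠ [] := by
  cases cs with
  | nil => simp [splitTopB]
  | cons c cs => simp only [splitTopB]; split_ifs <;> first | exact consHd_ne_nil _ _ | simp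

theorem consHd_nil (l : List (List Char)) (h : l ≠ []) : consHd [] l = l := by
  cases l with
  | nil => exact absurd rfl h
  | cons p ps => simp [consHd]

theorem consHd_consHd (m m' : List Char) (l : List (List Char)) :
    consHd m (consHd m' l) = consHd (m ++ m') l := by
  cases l <;> simp [consHd]

theorem filtB_cons (p : List Char) (ps : List (List Char)) :
    filtB (p :: ps) =
      (if PySem.Chars.strip p = [] then [] else [String.ofList (PySem.Chars.strip p)]) ++ filtB ps := by
  simp only [filtB, List.filterMap_cons]; split_ifs <;> simp

-- A's flush loop computes the stripped nonempty segments of the reference splitter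
theorem loopA_eq (cs : List Char) : ∀ (ops : List String) (cur : List Char) (d : Int),
    finA (cs.foldl stepA (ops, cur, d)) = ops ++ filtB (consHd cur (splitTopB cs d)) := by
  induction cs with
  | nil =>
    intro ops cur d
    simp only [List.foldl_nil, finA, splitTopB, consHd, List.append_nil, filtB,
      List.filterMap_cons, List.filterMap_nil]
    split_ifs <;> simp_all
  | cons c cs ih =>
    intro ops cur d
    rw [List.foldl_cons]
    simp only [stepA, splitTopB]
    by_cases h1 : c = '(' ∨ c = '[' ∨ c = '{'
    · simp only [if_pos h1]
      rw [ih, consHd_consHd]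
    · by_cases h2 : c = ')' ∨ c = ']' ∨ c = '}'
      · simp only [if_neg h1, if_pos h2]
        rw [ih, consHd_consHd]
      · by_cases h3 : c = ',' ∧ d = 0
        · simp only [if_neg h1, if_neg h2, if_pos h3]
          rw [ih, consHd_nil _ (splitTopB_ne_nil cs d)]
          have hcons : consHd cur ([] :: splitTopB cs d) = cur :: splitTopB cs d := by
            simp [consHd]
          rw [hcons, filtB_cons]
          split_ifs <;> simp_all
        · simp only [if_neg h1, if_neg h2, if_neg h3]
          rw [ih, consHd_consHd]

-- B's phase-1 scan computes the reference boundary list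
theorem cuts_eq (cs : List Char) : ∀ (q : Nat) (acc : List Int) (d : Int),
    ((PySem.List.enumerate cs (q : Int)).foldl stepCutsB (acc, d)).1 = acc ++ cutsN q d cs := by
  induction cs with
  | nil => intro q acc d; simp [PySem.List.enumerate_nil, cutsN]
  | cons c cs ih =>
    intro q acc d
    rw [PySem.List.enumerate_cons, List.foldl_cons]
    simp only [stepCutsB, cutsN]
    have hq : (q : Int) + 1 = ((q + 1 : Nat) : Int) := by push_cast; ring
    by_cases h1 : c = '(' ∨ c = '[' ∨ c = '{'
    · simp only [if_pos h1]; rw [hq, ih]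
    · by_cases h2 : c = ')' ∨ c = ']' ∨ c = '}'
      · simp only [if_neg h1, if_pos h2]; rw [hq, ih]
      · by_cases h3 : c = ',' ∧ d = 0
        · simp only [if_neg h1, if_neg h2, if_pos h3]; rw [hq, ih]; simp
        · simp only [if_neg h1, if_neg h2, if_neg h3]; rw [hq, ih]

-- B's phase-2 slicing fold rebuilds the stripped nonempty segments of the reference splitter
theorem slices_eq (cs : List Char) : ∀ (d : Int) (pre mid : List Char) (acc : List String),
    ((cutsN (pre.length + mid.length) d cs ++ [((pre.length + mid.length + cs.length : Nat) : Int)]).foldl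
        (stepSliceB (pre ++ mid ++ cs)) (acc, (pre.length : Int))).1
    = acc ++ filtB (consHd mid (splitTopB cs d)) := by
  induction cs with
  | nil =>
    intro d pre mid acc
    simp only [cutsN, List.nil_append, List.length_nil, Nat.add_zero, List.append_nil,
      List.foldl_cons, List.foldl_nil, stepSliceB]
    rw [PySem.List.slice_natCast]
    have htake : ((pre ++ mid).drop pre.length).take (pre.length + mid.length - pre.length) = mid := by
      rw [List.drop_append]; simp
    rw [htake]
    simp only [splitTopB, consHd, List.append_nil, filtB, List.filterMap_cons, List.filterMap_nil]
    split_ifs <;> simp_all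
  | cons c cs ih =>
    intro d pre mid acc
    simp only [splitTopB, cutsN]
    by_cases h1 : c = '(' ∨ c = '[' ∨ c = '{'
    · simp only [if_pos h1]
      have key := ih (d + 1) pre (mid ++ [c]) acc
      simp only [List.length_append, List.length_cons, List.length_nil,
        List.append_assoc, List.singleton_append] at key ⊢
      rw [show pre.length + (mid.length + 1) + cs.length = pre.length + mid.length + (cs.length + 1) by omega] at key
      rw [show pre.length + mid.length + 1 = pre.length + (mid.length + 1) by omega]
      rw [key, consHd_consHd]
    · by_cases h2 : c = ')' ∨ c = ']' ∨ c = '}'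
      · simp only [if_neg h1, if_pos h2]
        have key := ih (d - 1) pre (mid ++ [c]) acc
        simp only [List.length_append, List.length_cons, List.length_nil,
          List.append_assoc, List.singleton_append] at key ⊢
        rw [show pre.length + (mid.length + 1) + cs.length = pre.length + mid.length + (cs.length + 1) by omega] at key
        rw [show pre.length + mid.length + 1 = pre.length + (mid.length + 1) by omega]
        rw [key, consHd_consHd]
      · by_cases h3 : c = ',' ∧ d = 0
        · simp only [if_neg h1, if_neg h2, if_pos h3]
          rw [List.cons_append, List.foldl_cons]
          simp only [stepSliceB]
          rw [PySem.List.slice_natCast]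
          have hseg : ((pre ++ mid ++ c :: cs).drop pre.length).take (pre.length + mid.length - pre.length) = mid := by
            rw [List.append_assoc, List.drop_append]
            simp
          rw [hseg]
          have key := ih d (pre ++ mid ++ [c]) []
            (if PySem.Chars.strip mid ≠ [] then acc ++ [String.ofList (PySem.Chars.strip mid)] else acc)
          simp only [List.length_append, List.length_cons, List.length_nil, Nat.add_zero,
            List.append_assoc, List.singleton_append] at key ⊢
          rw [show pre.length + (mid.length + 1) + cs.length = pre.length + mid.length + (cs.length + 1) by omega] at key
          rw [show ((pre.length + mid.length : Nat) : Int) + 1 = ((pre.length + (mid.length + 1) : Nat) : Int) by push_cast; ring]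
          rw [show pre.length + (mid.length + (0 + 1)) = pre.length + (mid.length + 1) by omega] at key
          rw [show pre.length + mid.length + 1 = pre.length + (mid.length + 1) by omega]
          rw [key, consHd_nil _ (splitTopB_ne_nil cs d)]
          have hcons : consHd mid ([] :: splitTopB cs d) = mid :: splitTopB cs d := by
            simp [consHd]
          rw [hcons, filtB_cons]
          split_ifs <;> simp_all
        · simp only [if_neg h1, if_neg h2, if_neg h3]
          have key := ih d pre (mid ++ [c]) acc
          simp only [List.length_append, List.length_cons, List.length_nil,
            List.append_assoc, List.singleton_append] at key ⊢
          rw [show pre.length + (mid.length + 1) + cs.length = pre.length + mid.length + (cs.length + 1) by omega] at key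
          rw [show pre.length + mid.length + 1 = pre.length + (mid.length + 1) by omega]
          rw [key, consHd_consHd]

-- the common branch structure of the two ports, with the shared preamble values abstracted out
theorem core (idx : Int) (opnd : String) :
    (if idx = -1 then []
     else if opnd = "" then []
     else finA (opnd.toList.foldl stepA ([], [], 0)))
    = (if idx = -1 then []
       else ((((PySem.List.enumerate opnd.toList).foldl stepCutsB ([], 0)).1 ++
              [(opnd.toList.length : Int)]).foldl (stepSliceB opnd.toList) ([], 0)).1) := by
  by_cases h1 : idx = -1
  · rw [if_pos h1, if_pos h1]
  · rw [if_neg h1, if_neg h1]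
    by_cases h2 : opnd = ""
    · rw [if_pos h2, h2]
      decide
    · rw [if_neg h2]
      rw [loopA_eq _ [] [] 0]
      have hc := cuts_eq opnd.toList 0 [] 0
      simp only [Nat.cast_zero, List.nil_append] at hc
      rw [hc]
      have hs := slices_eq opnd.toList 0 [] [] []
      simp only [List.length_nil, Nat.add_zero, Nat.zero_add, List.nil_append,
        Nat.cast_zero] at hs
      rw [hs]
      rw [consHd_nil _ (splitTopB_ne_nil opnd.toList 0)]
      simp

-- ===== VERDICT (by name: the statement is the Claim_ definition above) =====
theorem extract_operands_py_spec : Claim_equal_extract_operands_py := by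
  intro line mnemonic _dom
  unfold Spec_extract_operands_py
  unfold extract_operands_py extract_operands_py_alt stripCommentsB
  exact core _ _
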